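-- pv_equiv track=rewrite | github.com/jorippppong/Daily_Challenge | BOJ/python/3085.py | maxCandyNum
-- ===== SOURCE A (Python) =====
-- def maxCandyNum(board, n):
--     maxNum = -1
--     # 오른쪽으로 진행하면서 비교
--     for i in range(n):
--         color, count = board[i][0], 1
--         for j in range(1, n):
--             # 색이 바뀔 때 최대 갯수 갱신
--             if color == board[i][j]:
--                 count += 1
--             else:
--                 maxNum = max(maxNum, count)
--                 color, count = board[i][j], 1
--         # 한 줄이 끝날 때 최대 갯수 갱신
--         maxNum = max(maxNum, count)
--
--     # 아래로 진행하면서 비교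
--     for i in range(n):
--         color, count = board[0][i], 1
--         for j in range(1, n):
--             if color == board[j][i]:
--                 count += 1
--             else:
--                 maxNum = max(maxNum, count)
--                 color, count = board[j][i], 1
--         maxNum = max(maxNum, count)
--
--     return maxNum
-- ===== SOURCE B (Python) =====
-- def _max_run(line):
--     # run lengths are the gaps between consecutive break (colour-change) positions
--     m = len(line)
--     breaks = [0] + [k + 1 for k, (x, y) in enumerate(zip(line, line[1:])) if x != y] + [m]
--     return max(b - a for a, b in zip(breaks, breaks[1:]))
--
--
-- def maxCandyNum(board, n):
--     if n <= 0:
--         return -1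
--     grid = [row[:n] for row in board[:n]]
--     lines = grid + [[grid[j][i] for j in range(n)] for i in range(n)]
--     best = -1
--     for line in lines:
--         best = max(best, _max_run(line))
--     return best
-- ===== Notes on version B (the rewrite author's own statement) =====
-- stated objective: alternative
-- what changed: Instead of A's two streaming scans that carry (color,count) state and update a running maximum at every colour change, B materialises the n-by-n grid with its column lists and, per line, computes the break (colour-change) positions and takes the maximum gap between consecutive breaks.
import Mathlib
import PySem

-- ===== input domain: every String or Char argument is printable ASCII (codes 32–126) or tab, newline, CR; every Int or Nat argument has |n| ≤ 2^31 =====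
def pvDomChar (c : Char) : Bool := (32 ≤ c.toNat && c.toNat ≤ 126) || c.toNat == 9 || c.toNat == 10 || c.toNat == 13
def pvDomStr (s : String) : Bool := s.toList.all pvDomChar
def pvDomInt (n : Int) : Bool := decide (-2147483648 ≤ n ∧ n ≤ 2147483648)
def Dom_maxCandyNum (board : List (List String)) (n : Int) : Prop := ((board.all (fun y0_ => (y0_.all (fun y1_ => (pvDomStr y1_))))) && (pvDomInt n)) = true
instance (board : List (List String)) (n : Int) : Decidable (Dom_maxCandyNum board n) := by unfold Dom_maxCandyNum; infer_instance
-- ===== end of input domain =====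

-- B replaces A's two streaming max-run scans by a break-position formulation
-- (colour-change indices per line; run lengths are the gaps between breaks)
-- over the explicit list of row and column lines; objective: alternative decomposition.

-- ===== PORT A =====
-- A's inner-loop step: the (maxNum, color, count) triple updated against the next cell
def stepA (s : Int × String × Int) (x : String) : Int × String × Int :=
  if s.2.1 == x then (s.1, s.2.1, s.2.2 + 1) else (max s.1 s.2.2, x, 1)

def maxCandyNum (board : List (List String)) (n : Int) : Int :=
  -- first loop: rows (board[i][j])
  let m1 : Int := (PySem.List.pyRange 0 n 1).foldl (fun maxNum i =>
    let st := (PySem.List.pyRange 1 n 1).foldl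
      (fun s j => stepA s (PySem.List.pyGetD (PySem.List.pyGetD board i []) j ""))
      (maxNum, PySem.List.pyGetD (PySem.List.pyGetD board i []) 0 "", 1)
    max st.1 st.2.2) (-1)
  -- second loop: columns (board[j][i])
  (PySem.List.pyRange 0 n 1).foldl (fun maxNum i =>
    let st := (PySem.List.pyRange 1 n 1).foldl
      (fun s j => stepA s (PySem.List.pyGetD (PySem.List.pyGetD board j []) i ""))
      (maxNum, PySem.List.pyGetD (PySem.List.pyGetD board 0 []) i "", 1)
    max st.1 st.2.2) m1

-- ===== PORT B =====
-- Source B's 'b - a for a, b in zip(l, l[1:])' (successive differences)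
def diffs (l : List Int) : List Int := (l.zip l.tail).map (fun p => p.2 - p.1)

-- Source B's _max_run: breaks = [0] + colour-change positions + [m]; answer = max gap
def maxRunAlt (line : List String) : Int :=
  let m : Int := line.length
  let breaks : List Int :=
    [0] ++ ((PySem.List.enumerate (line.zip (PySem.List.slice line (some 1) none)) 0).filterMap
      (fun p => if p.2.1 != p.2.2 then some (p.1 + 1) else none)) ++ [m]
  match diffs breaks with
  | [] => -1   -- unreachable: breaks always has at least two elements
  | d :: ds => ds.foldl max d

def maxCandyNum_alt (board : List (List String)) (n : Int) : Int :=
  if n ≤ 0 then -1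
  else
    let grid := (PySem.List.slice board none (some n)).map
      (fun row => PySem.List.slice row none (some n))
    let lines := grid ++ (PySem.List.pyRange 0 n 1).map (fun i =>
      (PySem.List.pyRange 0 n 1).map (fun j =>
        PySem.List.pyGetD (PySem.List.pyGetD grid j []) i ""))
    lines.foldl (fun best line => max best (maxRunAlt line)) (-1)

-- ===== PRECONDITION & SPEC =====
-- Pre_ excludes exactly the inputs where A raises IndexError: when n ≥ 1 it
-- reads board[i][j] for all 0 ≤ i,j < n, so the first n rows must exist and
-- have length ≥ n (for n ≤ 0 A reads nothing and returns -1).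
def Pre_maxCandyNum (board : List (List String)) (n : Int) : Prop :=
  n ≤ (board.length : Int) ∧ ∀ row ∈ board.take n.toNat, n ≤ (row.length : Int)
instance (board : List (List String)) (n : Int) : Decidable (Pre_maxCandyNum board n) := by
  unfold Pre_maxCandyNum; infer_instance

def pvWitness_maxCandyNum : List (List String) × Int := ([["R", "R"], ["G", "R"]], 2)

def Spec_maxCandyNum (board : List (List String)) (n : Int) (out : Int) : Prop := out = maxCandyNum_alt board n
instance (board : List (List String)) (n : Int) (out : Int) : Decidable (Spec_maxCandyNum board n out) := by unfold Spec_maxCandyNum; infer_instance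

-- ===== CLAIM (what is proved, stated in full; the proofs are below) =====
def Claim_equal_maxCandyNum : Prop := ∀ (board : List (List String)) (n : Int), Dom_maxCandyNum board n → Pre_maxCandyNum board n → Spec_maxCandyNum board n (maxCandyNum board n)

-- ===== LEMMAS AND PROOFS =====

-- run lengths of (current colour c seen k times) followed by the rest of the line
def runsAux (c : String) (k : Int) : List String → List Int
  | [] => [k]
  | x :: t => if c == x then runsAux c (k + 1) t else k :: runsAux x 1 t

-- max of a list of run lengths, with A's sentinel -1 for the empty list
def ML (l : List Int) : Int := l.foldr max (-1)

-- maximum run length of a line (-1 for the empty line)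
def MR : List String → Int
  | [] => -1
  | a :: t => ML (runsAux a 1 t)

-- colour-change positions (index of the right cell of each unequal adjacent pair)
def changes (off : Int) : List String → List Int
  | x :: y :: r => if x != y then (off + 1) :: changes (off + 1) (y :: r)
                   else changes (off + 1) (y :: r)
  | _ => []

lemma ML_cons (d : Int) (l : List Int) : ML (d :: l) = max d (ML l) := rfl

lemma foldl_max_ML (ds : List Int) : ∀ (d : Int), -1 ≤ d → (∀ v ∈ ds, -1 ≤ v) →
    ds.foldl max d = max d (ML ds) := by
  induction ds with
  | nil => intro d hd _; simp [ML]; omega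
  | cons v r ih =>
    intro d hd hv
    have h1 : -1 ≤ max d v := le_trans hd (le_max_left _ _)
    have := ih (max d v) h1 (fun x hx => hv x (List.mem_cons_of_mem _ hx))
    simp only [List.foldl_cons, this, ML_cons, max_assoc]

lemma runsAux_ne_nil (t : List String) : ∀ (c : String) (k : Int), runsAux c k t ≠ [] := by
  induction t with
  | nil => intro c k; simp [runsAux]
  | cons x r ih =>
    intro c k
    by_cases h : (c == x) = true <;> simp [runsAux, h, ih]

lemma runsAux_ge (t : List String) : ∀ (c : String) (k : Int), 1 ≤ k →
    ∀ v ∈ runsAux c k t, 1 ≤ v := by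
  induction t with
  | nil => intro c k hk v hv; simp [runsAux] at hv; omega
  | cons x r ih =>
    intro c k hk v hv
    by_cases h : (c == x) = true
    · simp only [runsAux, h, if_pos] at hv
      exact ih c (k + 1) (by omega) v hv
    · simp only [runsAux, h, if_neg, Bool.false_eq_true, not_false_iff, List.mem_cons] at hv
      rcases hv with rfl | hv
      · exact hk
      · exact ih x 1 le_rfl v hv

-- A's streaming inner loop computes max of the initial maximum and all run lengths
lemma A_line (t : List String) : ∀ (m : Int) (c : String) (k : Int), 1 ≤ k →
    (let st := t.foldl stepA (m, c, k); max st.1 st.2.2) = max m (ML (runsAux c k t)) := by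
  induction t with
  | nil =>
    intro m c k hk
    simp only [List.foldl_nil, runsAux, ML, List.foldr]
    rw [max_eq_left (by omega : (-1 : Int) ≤ k)]
  | cons x r ih =>
    intro m c k hk
    by_cases h : (c == x) = true
    · simp only [List.foldl_cons, stepA, h, if_pos, runsAux]
      exact ih m c (k + 1) (by omega)
    · simp only [List.foldl_cons, stepA, h, if_neg, Bool.false_eq_true, not_false_iff, runsAux]
      have := ih (max m k) x 1 le_rfl
      simp only [this, ML_cons, max_assoc]

-- the filterMap over enumerated adjacent pairs computes the change positions
lemma changes_filterMap (l : List String) : ∀ (s : Int),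
    (PySem.List.enumerate (l.zip l.tail) s).filterMap
      (fun p => if p.2.1 != p.2.2 then some (p.1 + 1) else none) = changes s l := by
  induction l with
  | nil => intro s; simp [changes, PySem.List.enumerate_nil]
  | cons x xs ih =>
    intro s
    cases xs with
    | nil => simp [changes, PySem.List.enumerate_nil]
    | cons y r =>
      simp only [List.tail_cons, List.zip_cons_cons, PySem.List.enumerate_cons,
        List.filterMap_cons]
      have := ih (s + 1)
      simp only [List.tail_cons] at this
      by_cases h : (x != y) = true
      · simp [changes, h, ← this]
      · simp [changes, h, ← this]

lemma diffs_cons2 (a b : Int) (t : List Int) :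
    diffs (a :: b :: t) = (b - a) :: diffs (b :: t) := rfl

lemma runsAux_congr (c : String) (t : List String) {k k' : Int} (h : k = k') :
    runsAux c k t = runsAux c k' t := by rw [h]

-- gaps between consecutive breaks are exactly the run lengths
lemma gaps_runs (r : List String) : ∀ (x : String) (s off : Int),
    diffs (s :: (changes off (x :: r) ++ [off + 1 + (r.length : Int)])) =
      runsAux x (off + 1 - s) r := by
  induction r with
  | nil =>
    intro x s off
    simp [changes, diffs, runsAux]
  | cons y r ih =>
    intro x s off
    by_cases h : (x == y) = true
    · have hxy : x = y := by simpa using h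
      subst hxy
      have hne : (x != x) = false := by simp
      have hlen : off + 1 + (((x :: r)).length : Int) = (off + 1) + 1 + (r.length : Int) := by
        push_cast [List.length_cons]; ring
      calc diffs (s :: (changes off (x :: x :: r) ++ [off + 1 + ((x :: r).length : Int)]))
          = diffs (s :: (changes (off + 1) (x :: r) ++ [(off + 1) + 1 + (r.length : Int)])) := by
            rw [hlen]; simp [changes]
        _ = runsAux x ((off + 1) + 1 - s) r := ih x s (off + 1)
        _ = runsAux x (off + 1 - s + 1) r := runsAux_congr _ _ (by ring)
        _ = runsAux x (off + 1 - s) (x :: r) := by simp [runsAux]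
    · have hne : (x != y) = true := by simpa using h
      have hstep : changes off (x :: y :: r) = (off + 1) :: changes (off + 1) (y :: r) := by
        simp [changes, hne]
      have hlen : off + 1 + (((y :: r)).length : Int) = (off + 1) + 1 + (r.length : Int) := by
        push_cast [List.length_cons]; ring
      rw [hstep, hlen, List.cons_append, diffs_cons2, ih y (off + 1) (off + 1)]
      have h1 : (off + 1) + 1 - (off + 1) = (1 : Int) := by ring
      rw [h1]
      simp [runsAux, h]

-- B's per-line computation equals the maximum run length
lemma maxRunAlt_MR (a : String) (t : List String) : maxRunAlt (a :: t) = MR (a :: t) := by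
  have e1 : ((a :: t).zip (PySem.List.slice (a :: t) (some 1) none)) = ((a :: t).zip (a :: t).tail) := by
    rw [PySem.List.slice_from_one]
  have hm : (((a :: t).length : Nat) : Int) = 0 + 1 + (t.length : Int) := by
    push_cast [List.length_cons]; ring
  have e3 : (([0] ++ changes 0 (a :: t) ++ [(((a :: t).length : Nat) : Int)]) : List Int)
      = 0 :: (changes 0 (a :: t) ++ [0 + 1 + (t.length : Int)]) := by
    rw [hm]; simp
  have e4 : diffs (0 :: (changes 0 (a :: t) ++ [0 + 1 + (t.length : Int)])) = runsAux a 1 t := by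
    rw [gaps_runs]; exact runsAux_congr _ _ (by ring)
  simp only [maxRunAlt]
  rw [e1, changes_filterMap (a :: t) 0, e3, e4]
  rcases hr : runsAux a 1 t with _ | ⟨d, ds⟩
  · exact absurd hr (runsAux_ne_nil t a 1)
  · have hd : 1 ≤ d := runsAux_ge t a 1 le_rfl d (by rw [hr]; exact List.mem_cons_self ..)
    have hds : ∀ v ∈ ds, (-1 : Int) ≤ v := by
      intro v hv
      have := runsAux_ge t a 1 le_rfl v (by rw [hr]; exact List.mem_cons_of_mem _ hv)
      omega
    show ds.foldl max d = MR (a :: t)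
    rw [foldl_max_ML ds d (by omega) hds]
    show max d (ML ds) = MR (a :: t)
    rw [show MR (a :: t) = ML (runsAux a 1 t) from rfl, hr, ML_cons]

-- A's outer-loop body for one line, written as a map over indices
lemma genfold (f : Int → String) (n : Int) (hn : 1 ≤ n) (m : Int) :
    (let st := (PySem.List.pyRange 1 n 1).foldl (fun s j => stepA s (f j)) (m, f 0, 1)
     max st.1 st.2.2) = max m (MR ((PySem.List.pyRange 0 n 1).map f)) := by
  set C := (PySem.List.pyRange 0 n 1).map f with hC
  have hlen : (C.length : Int) = n := by
    simp only [hC, List.length_map, PySem.List.length_pyRange_one]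
    omega
  have hget : ∀ j : Int, 0 ≤ j → j < n → PySem.List.pyGetD C j "" = f j := by
    intro j h0 hj
    rw [hC]
    exact PySem.List.pyGetD_map_pyRange_of_nonneg f n j "" h0 hj
  show max ((PySem.List.pyRange 1 n 1).foldl (fun s j => stepA s (f j)) (m, f 0, 1)).1
      ((PySem.List.pyRange 1 n 1).foldl (fun s j => stepA s (f j)) (m, f 0, 1)).2.2
      = max m (MR C)
  rw [show f 0 = PySem.List.pyGetD C 0 "" from (hget 0 le_rfl (by omega)).symm]
  have hfold : (PySem.List.pyRange 1 n 1).foldl (fun s j => stepA s (f j))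
        (m, PySem.List.pyGetD C 0 "", 1)
      = (PySem.List.pyRange 1 n 1).foldl (fun s j => stepA s (PySem.List.pyGetD C j ""))
        (m, PySem.List.pyGetD C 0 "", 1) := by
    apply PySem.List.foldl_congr_mem
    intro acc j hj
    rw [PySem.List.mem_pyRange_one] at hj
    rw [hget j (by omega) hj.2]
  rw [hfold, ← hlen, PySem.List.foldl_pyRange_pyGetD' C "" stepA (m, PySem.List.pyGetD C 0 "", 1) (by norm_num : (0:Int) ≤ 1)]
  rcases hc : C with _ | ⟨c0, ct⟩
  · exfalso; rw [hc] at hlen; simp at hlen; omega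
  · simp only [Int.toNat_one, List.drop_succ_cons, List.drop_zero, PySem.List.pyGetD_zero_cons]
    exact A_line ct m c0 1 le_rfl

lemma slice_to_int {α : Type} (xs : List α) (n : Int) (h : 0 ≤ n) :
    PySem.List.slice xs none (some n) = xs.take n.toNat := by
  have e : n = ((n.toNat : Nat) : Int) := (Int.toNat_of_nonneg h).symm
  conv_lhs => rw [e]
  rw [PySem.List.slice_to_natCast]

theorem maxCandyNum_spec : Claim_equal_maxCandyNum := by
  intro board n _ hpre
  unfold Spec_maxCandyNum
  obtain ⟨h1, h2⟩ := hpre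
  by_cases hn : n ≤ 0
  · simp [maxCandyNum, maxCandyNum_alt, hn, PySem.List.pyRange_one_eq_nil hn]
  · have hn1 : (1 : Int) ≤ n := by omega
    have hnB : ¬ (n ≤ 0) := hn
    set K := n.toNat with hK
    have hKb : K ≤ board.length := by omega
    have hrow : ∀ (j : Nat) (hj : j < board.length), (j : Int) < n →
        n ≤ (board[j].length : Int) := by
      intro j hj hjn
      apply h2
      have hjk : j < (board.take K).length := by
        simp [List.length_take]; omega
      have e : (board.take K)[j] = board[j] := List.getElem_take
      rw [← e]
      exact List.getElem_mem hjk
    set rowF := fun i : Int => (PySem.List.pyRange 0 n 1).map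
      (fun j => PySem.List.pyGetD (PySem.List.pyGetD board i []) j "") with hrowF
    set colF := fun i : Int => (PySem.List.pyRange 0 n 1).map
      (fun j => PySem.List.pyGetD (PySem.List.pyGetD board j []) i "") with hcolF
    -- A as a fold of per-line maxima over the row lines then the column lines
    have hpart1 : ∀ init : Int,
        (PySem.List.pyRange 0 n 1).foldl (fun maxNum i =>
          let st := (PySem.List.pyRange 1 n 1).foldl
            (fun s j => stepA s (PySem.List.pyGetD (PySem.List.pyGetD board i []) j ""))
            (maxNum, PySem.List.pyGetD (PySem.List.pyGetD board i []) 0 "", 1)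
          max st.1 st.2.2) init
        = ((PySem.List.pyRange 0 n 1).map rowF).foldl (fun m l => max m (MR l)) init := by
      intro init
      rw [List.foldl_map]
      apply PySem.List.foldl_congr_mem
      intro acc i hi
      exact genfold (fun j => PySem.List.pyGetD (PySem.List.pyGetD board i []) j "") n hn1 acc
    have hpart2 : ∀ init : Int,
        (PySem.List.pyRange 0 n 1).foldl (fun maxNum i =>
          let st := (PySem.List.pyRange 1 n 1).foldl
            (fun s j => stepA s (PySem.List.pyGetD (PySem.List.pyGetD board j []) i ""))
            (maxNum, PySem.List.pyGetD (PySem.List.pyGetD board 0 []) i "", 1)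
          max st.1 st.2.2) init
        = ((PySem.List.pyRange 0 n 1).map colF).foldl (fun m l => max m (MR l)) init := by
      intro init
      rw [List.foldl_map]
      apply PySem.List.foldl_congr_mem
      intro acc i hi
      exact genfold (fun j => PySem.List.pyGetD (PySem.List.pyGetD board j []) i "") n hn1 acc
    have hA : maxCandyNum board n
        = (((PySem.List.pyRange 0 n 1).map rowF ++ (PySem.List.pyRange 0 n 1).map colF).foldl
            (fun m l => max m (MR l)) (-1)) := by
      rw [List.foldl_append]
      show (PySem.List.pyRange 0 n 1).foldl _
          ((PySem.List.pyRange 0 n 1).foldl _ (-1)) = _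
      rw [hpart1, hpart2]
    -- B's grid is the row lines
    have hgrid : (PySem.List.slice board none (some n)).map
          (fun row => PySem.List.slice row none (some n))
        = (PySem.List.pyRange 0 n 1).map rowF := by
      rw [slice_to_int board n (by omega)]
      apply List.ext_getElem
      · simp only [List.length_map, List.length_take, PySem.List.length_pyRange_one]; omega
      · intro i hi1 hi2
        have hiK : i < K := by
          simp only [List.length_map, List.length_take] at hi1; omega
        have hib : i < board.length := by omega
        have hilen : n ≤ (board[i].length : Int) := hrow i hib (by omega)
        simp only [List.getElem_map, PySem.List.getElem_pyRange_one, List.getElem_take]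
        rw [slice_to_int _ n (by omega)]
        simp only [hrowF]
        apply List.ext_getElem
        · simp only [List.length_map, List.length_take, PySem.List.length_pyRange_one]; omega
        · intro j hj1 hj2
          have hjK : j < K := by simp only [List.length_take] at hj1; omega
          simp only [List.getElem_map, PySem.List.getElem_pyRange_one, List.getElem_take,
            zero_add, PySem.List.pyGetD_natCast]
          rw [List.getD_eq_getElem board [] hib,
            List.getD_eq_getElem board[i] "" (by omega : j < board[i].length)]
    -- B's column lines are A's column lines
    have hcols : (PySem.List.pyRange 0 n 1).map (fun i =>
          (PySem.List.pyRange 0 n 1).map (fun j =>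
            PySem.List.pyGetD (PySem.List.pyGetD ((PySem.List.slice board none (some n)).map
              (fun row => PySem.List.slice row none (some n))) j []) i ""))
        = (PySem.List.pyRange 0 n 1).map colF := by
      apply List.map_congr_left
      intro i hi
      rw [PySem.List.mem_pyRange_one] at hi
      rw [hcolF]
      apply List.map_congr_left
      intro j hj
      rw [PySem.List.mem_pyRange_one] at hj
      rw [hgrid]
      have e1 : PySem.List.pyGetD ((PySem.List.pyRange 0 n 1).map rowF) j []
          = rowF (0 + (j.toNat : Int)) := by
        rw [PySem.List.pyGetD_eq_getElem _ [] hj.1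
          (by simp only [List.length_map, PySem.List.length_pyRange_one]; omega)]
        simp only [List.getElem_map, PySem.List.getElem_pyRange_one]
      rw [e1]
      simp only [hrowF]
      rw [PySem.List.pyGetD_map_pyRange_of_nonneg _ n i "" hi.1 hi.2]
      rw [show ((0:Int) + (j.toNat : Int)) = j by omega]
    -- B equals the same fold with MR in place of maxRunAlt (all lines are nonempty)
    have hB : maxCandyNum_alt board n
        = (((PySem.List.pyRange 0 n 1).map rowF ++ (PySem.List.pyRange 0 n 1).map colF).foldl
            (fun m l => max m (MR l)) (-1)) := by
      simp only [maxCandyNum_alt]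
      rw [if_neg hnB, hcols, hgrid]
      apply PySem.List.foldl_congr_mem
      intro acc l hl
      have hlen : l.length = (n - 0).toNat := by
        rcases List.mem_append.mp hl with h | h <;> obtain ⟨i, _, rfl⟩ := List.mem_map.mp h <;>
          simp [hrowF, hcolF, PySem.List.length_pyRange_one]
      rcases l with _ | ⟨a, t⟩
      · exfalso; simp at hlen; omega
      · rw [maxRunAlt_MR]
    rw [hA, hB]
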